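-- pv_equiv track=rewrite | github.com/adarshm86/TIME_TABLE_SCHEDULER | backend/main.py | _distribute_slots
-- ===== SOURCE A (Python) =====
-- DAYS = ["Mon", "Tue", "Wed", "Thu", "Fri"]
--
-- MIN_SLOTS_PER_DAY = 5   # IMPORTANT for feasibility
--
-- MAX_SLOTS_PER_DAY = 7
--
-- def _distribute_slots(total):
--     min_total = MIN_SLOTS_PER_DAY * len(DAYS)
--     max_total = MAX_SLOTS_PER_DAY * len(DAYS)
--     if not (min_total <= total <= max_total):
--         return None
--
--     allocation = {d: MIN_SLOTS_PER_DAY for d in DAYS}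
--     remaining = total - min_total
--
--     for d in DAYS:
--         if remaining <= 0:
--             break
--         can_add = MAX_SLOTS_PER_DAY - allocation[d]
--         add = min(can_add, remaining)
--         allocation[d] += add
--         remaining -= add
--
--     return allocation if remaining == 0 else None
-- ===== SOURCE B (Python) =====
-- DAYS = ["Mon", "Tue", "Wed", "Thu", "Fri"]
--
-- MIN_SLOTS_PER_DAY = 5
--
-- MAX_SLOTS_PER_DAY = 7
--
-- def _distribute_slots(total):
--     lo = MIN_SLOTS_PER_DAY * len(DAYS)
--     hi = MAX_SLOTS_PER_DAY * len(DAYS)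
--     if not (lo <= total <= hi):
--         return None
--     q, r = divmod(total - lo, MAX_SLOTS_PER_DAY - MIN_SLOTS_PER_DAY)
--     return {d: (MAX_SLOTS_PER_DAY if i < q
--                 else MIN_SLOTS_PER_DAY + r if i == q
--                 else MIN_SLOTS_PER_DAY)
--             for i, d in enumerate(DAYS)}
-- ===== Notes on version B (the rewrite author's own statement) =====
-- stated objective: simpler
-- what changed: Replaced the greedy accumulate/subtract loop over a mutable dict with a closed-form divmod: day i gets MAX if i < q, MIN + r if i == q, else MIN, where q, r = divmod(total - min_total, MAX - MIN).
import Mathlib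
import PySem

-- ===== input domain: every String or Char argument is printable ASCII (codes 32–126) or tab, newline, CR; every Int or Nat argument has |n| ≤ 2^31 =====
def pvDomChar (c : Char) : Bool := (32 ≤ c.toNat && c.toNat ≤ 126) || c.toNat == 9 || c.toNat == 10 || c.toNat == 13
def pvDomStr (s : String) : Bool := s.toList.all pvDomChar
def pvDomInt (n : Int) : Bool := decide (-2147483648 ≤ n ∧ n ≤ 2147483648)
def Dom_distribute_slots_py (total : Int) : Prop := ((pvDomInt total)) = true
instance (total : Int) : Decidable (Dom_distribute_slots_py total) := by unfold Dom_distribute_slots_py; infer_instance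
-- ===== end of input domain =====

-- B replaces A's greedy accumulate/subtract loop with a closed-form divmod allocation (same cost, simpler).
-- ===== PORT A =====
def pvDaysA : List String := ["Mon", "Tue", "Wed", "Thu", "Fri"]

-- the 'for d in DAYS' loop with its 'break': structural recursion over the remaining days
def pvLoopA : List String → PySem.Dict String Int → Int → PySem.Dict String Int × Int
  | [], allocation, remaining => (allocation, remaining)
  | d :: rest, allocation, remaining =>
    if remaining ≤ 0 then (allocation, remaining)
    else
      let can_add : Int := 7 - (allocation.getD d 0)
      let add := min can_add remaining
      pvLoopA rest (allocation.insert d ((allocation.getD d 0) + add)) (remaining - add)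

def distribute_slots_py (total : Int) : Option (List (String × Int)) :=
  let min_total : Int := 5 * (pvDaysA.length : Int)
  let max_total : Int := 7 * (pvDaysA.length : Int)
  if ¬ (min_total ≤ total ∧ total ≤ max_total) then none
  else
    let allocation : PySem.Dict String Int :=
      pvDaysA.foldl (fun acc d => acc.insert d 5) PySem.Dict.empty
    let remaining := total - min_total
    let res := pvLoopA pvDaysA allocation remaining
    if res.2 = 0 then some res.1.items else none

-- ===== PORT B =====
def distribute_slots_py_alt (total : Int) : Option (List (String × Int)) :=
  let lo : Int := 5 * 5
  let hi : Int := 7 * 5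
  if ¬ (lo ≤ total ∧ total ≤ hi) then none
  else
    let q := PySem.Int.floordiv (total - lo) (7 - 5)
    let r := PySem.Int.mod (total - lo) (7 - 5)
    some ((["Mon", "Tue", "Wed", "Thu", "Fri"] : List String) |> PySem.List.enumerate |>.map
      (fun p => (p.2, if (p.1 : Int) < q then (7 : Int) else if (p.1 : Int) = q then 5 + r else 5)))

-- ===== PRECONDITION & SPEC =====
def Spec_distribute_slots_py (total : Int) (out : Option (List (String × Int))) : Prop := out = distribute_slots_py_alt total
instance (total : Int) (out : Option (List (String × Int))) : Decidable (Spec_distribute_slots_py total out) := by unfold Spec_distribute_slots_py; infer_instance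

-- ===== CLAIM (what is proved, stated in full; the proofs are below) =====
def Claim_equal_distribute_slots_py : Prop := ∀ (total : Int), Dom_distribute_slots_py total → Spec_distribute_slots_py total (distribute_slots_py total)

-- ===== LEMMAS AND PROOFS =====

-- ===== VERDICT (by name: the statement is the Claim_ definition above) =====
theorem distribute_slots_py_spec : Claim_equal_distribute_slots_py := by
  intro total hDom
  unfold Spec_distribute_slots_py
  by_cases h : 25 ≤ total ∧ total ≤ 35
  · obtain ⟨h1, h2⟩ := h
    interval_cases total <;> decide
  · have hA : distribute_slots_py total = none := by
      unfold distribute_slots_py pvDaysA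
      simp only [List.length_cons, List.length_nil]
      norm_num
      omega
    have hB : distribute_slots_py_alt total = none := by
      unfold distribute_slots_py_alt
      norm_num
      omega
    rw [hA, hB]
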